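-- pv_equiv track=rewrite | github.com/AKM0/WillPrismWordsB0t | WPWBot/WillPrismWordsBot.py | parse
-- ===== SOURCE A (Python) =====
-- BAD_PHRASES  = ["~","!","@","#","$","%","^","&","*","(",")","-","_","=","+","{","}","[","]","|",":",";","\"","'","<",">","?",",",".","/","\\"]
--
-- def parse (body): #isolates string to be operated and removes detrimental characters that cannot be passed through command prompt ()
--     body = body.split ("\"", 2) #isolates string
--     if (len(body) > 1):
--         word = body[1]
--         for index in range (len(BAD_PHRASES)): #removes bad characters
--                 word = word.replace (BAD_PHRASES[index], " ")
--     elif (len (body) <= 1):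
--        word = ""
--
--     print ("Parsed.")
--     return word
-- ===== SOURCE B (Python) =====
-- BAD_CHARS = set("~!@#$%^&*()-_=+{}[]|:;\"'<>?,./\\")
--
-- def parse(body):
--     parts = body.split("\"", 2)
--     word = "" if len(parts) <= 1 else "".join(
--         " " if c in BAD_CHARS else c for c in parts[1])
--     print("Parsed.")
--     return word
-- ===== Notes on version B (the rewrite author's own statement) =====
-- stated objective: simpler
-- what changed: Replaces the 33-pass replace loop (one full rescan of the word per bad character) with a single pass over the word's characters testing membership in a precomputed set of bad characters.
import Mathlib
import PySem

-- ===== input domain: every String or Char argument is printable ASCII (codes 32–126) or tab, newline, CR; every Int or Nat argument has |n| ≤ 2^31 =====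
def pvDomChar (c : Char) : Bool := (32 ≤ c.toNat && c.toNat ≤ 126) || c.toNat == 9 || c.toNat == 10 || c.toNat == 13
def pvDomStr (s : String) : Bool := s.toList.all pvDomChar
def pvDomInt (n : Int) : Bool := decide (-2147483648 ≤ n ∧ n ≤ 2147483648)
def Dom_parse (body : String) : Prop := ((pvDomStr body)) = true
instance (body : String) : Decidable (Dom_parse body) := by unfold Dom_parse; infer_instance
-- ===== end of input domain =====

-- B replaces A's 33-pass replace loop by a single pass over the extracted word's
-- characters testing membership in a set of bad characters (objective: simpler).

-- ===== PORT A =====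
def badPhrases : List String :=
  ["~","!","@","#","$","%","^","&","*","(",")","-","_","=","+","{","}","[","]","|",
   ":",";","\"","'","<",">","?",",",".","/","\\"]

def parse (body : String) : String :=
  -- body.split("\"", 2): separator is nonempty, so splitMax? is always some (getD unreachable)
  let parts := (PySem.Str.splitMax? body "\"" 2).getD []
  if parts.length > 1 then
    List.foldl (fun w (index : Int) =>
        PySem.Str.replace w ((PySem.List.pyGet? badPhrases index).getD "") " ")
      ((PySem.List.pyGet? parts 1).getD "")
      (PySem.List.pyRange 0 (badPhrases.length : Int) 1)
  else ""

-- ===== PORT B =====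
def badSet : PySem.Set Char := PySem.Set.ofList "~!@#$%^&*()-_=+{}[]|:;\"'<>?,./\\".toList

def parse_alt (body : String) : String :=
  let parts := (PySem.Str.splitMax? body "\"" 2).getD []
  if parts.length > 1 then
    -- "".join(" " if c in BAD_CHARS else c for c in parts[1])
    PySem.Str.join "" (((PySem.List.pyGet? parts 1).getD "").toList.map
      (fun c => if badSet.contains c then " " else String.ofList [c]))
  else ""

-- ===== PRECONDITION & SPEC =====
def Spec_parse (body : String) (out : String) : Prop := out = parse_alt body
instance (body : String) (out : String) : Decidable (Spec_parse body out) := by unfold Spec_parse; infer_instance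

-- ===== CLAIM =====
def Claim_equal_parse : Prop := ∀ (body : String), Dom_parse body → Spec_parse body (parse body)

-- ===== LEMMAS AND PROOFS =====

def badChars : List Char :=
  ['~','!','@','#','$','%','^','&','*','(',')','-','_','=','+','{','}','[',']','|',
   ':',';','"','\'','<','>','?',',','.','/','\\']

lemma go_single (b : Char) (fuel : Nat) (l acc : List Char) (h : l.length ≤ fuel) :
    PySem.Chars.replace.go [b] [' '] fuel l acc
      = acc.reverse ++ l.map (fun c => if c = b then ' ' else c) := by
  induction fuel generalizing l acc with
  | zero =>
    have hl : l = [] := List.eq_nil_of_length_eq_zero (Nat.le_zero.mp h)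
    subst hl; simp only [PySem.Chars.replace.go]; simp
  | succ fuel ih =>
    cases l with
    | nil => simp [PySem.Chars.replace.go]
    | cons c t =>
      simp only [PySem.Chars.replace.go, List.isPrefixOf]
      by_cases hc : c = b
      · simp only [hc, beq_self_eq_true, Bool.true_and, List.isPrefixOf, if_true]
        rw [show ([b].length) = 1 from rfl]
        rw [ih (List.drop 1 (b :: t)) ([' '].reverse ++ acc) (by simpa using Nat.le_of_succ_le_succ (by simpa using h))]
        simp
      · have : (b == c) = false := beq_eq_false_iff_ne.mpr (fun hh => hc hh.symm)
        simp only [this, Bool.false_and, if_false]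
        rw [ih t (c :: acc) (by simpa using Nat.le_of_succ_le_succ (by simpa using h))]
        simp [hc]

lemma repl_single (cs : List Char) (b : Char) :
    PySem.Chars.replace cs [b] [' '] = cs.map (fun c => if c = b then ' ' else c) := by
  unfold PySem.Chars.replace
  rw [if_neg (by simp)]
  exact go_single b cs.length cs [] le_rfl

lemma fold_bads (bads : List Char) (h : ' ' ∉ bads) (cs : List Char) :
    List.foldl (fun cs b => PySem.Chars.replace cs [b] [' ']) cs bads
      = cs.map (fun c => if bads.contains c then ' ' else c) := by
  induction bads generalizing cs with
  | nil => simp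
  | cons b rest ih =>
    simp only [List.foldl_cons]
    rw [repl_single, ih (fun hm => h (List.mem_cons_of_mem _ hm)), List.map_map]
    apply List.map_congr_left
    intro c _
    simp only [Function.comp]
    by_cases hc : c = b
    · subst hc
      have : rest.contains ' ' = false := by
        simp only [List.contains_eq_mem, decide_eq_false_iff_not]
        exact fun hm => h (List.mem_cons_of_mem _ hm)
      simp [this, List.contains_cons]
    · simp [hc, List.contains_cons, fun hh : b = c => hc hh.symm]

lemma memb_eq (c : Char) :
    badSet.contains c = badChars.contains c := by
  rfl

lemma strfold (w : String) (bs : List String) :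
    (List.foldl (fun w s => PySem.Str.replace w s " ") w bs).toList
      = List.foldl (fun cs s => PySem.Chars.replace cs s.toList [' ']) w.toList bs := by
  induction bs generalizing w with
  | nil => simp
  | cons s rest ih =>
    rw [List.foldl_cons, List.foldl_cons, ih, PySem.Str.toList_replace,
        show (" " : String).toList = [' '] from rfl]

lemma core (w : String) :
    List.foldl (fun w (index : Int) =>
        PySem.Str.replace w ((PySem.List.pyGet? badPhrases index).getD "") " ")
      w (PySem.List.pyRange 0 (badPhrases.length : Int) 1)
      = PySem.Str.join "" (w.toList.map
          (fun c => if badSet.contains c then " " else String.ofList [c])) := by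
  rw [← String.toList_inj]
  have hA : List.foldl (fun w (index : Int) =>
        PySem.Str.replace w ((PySem.List.pyGet? badPhrases index).getD "") " ")
      w (PySem.List.pyRange 0 (badPhrases.length : Int) 1)
      = List.foldl (fun w s => PySem.Str.replace w s " ") w badPhrases := rfl
  have hB : badPhrases = badChars.map (fun c => String.ofList [c]) := rfl
  rw [hA, strfold, hB]
  rw [List.foldl_map]
  have : (fun (cs : List Char) (c : Char) => PySem.Chars.replace cs (String.ofList [c]).toList [' '])
       = (fun cs b => PySem.Chars.replace cs [b] [' ']) := by
    funext cs c; rw [String.toList_ofList]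
  rw [this, fold_bads badChars (by decide)]
  rw [PySem.Str.toList_join, List.map_map]
  have : (String.toList ∘ fun c => if badSet.contains c then " " else String.ofList [c])
       = (fun c => [if badChars.contains c then ' ' else c]) := by
    funext c
    simp only [Function.comp, memb_eq]
    by_cases hc : c ∈ badChars <;> simp [hc]
  rw [this]
  rw [show (fun c => [if badChars.contains c = true then ' ' else c])
        = ((fun c => [c]) ∘ fun c => if badChars.contains c = true then ' ' else c) from rfl,
      ← List.map_map]
  exact (PySem.Chars.join_nil_singletons _).symm

-- ===== VERDICT =====
theorem parse_spec : Claim_equal_parse := by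
  intro body _
  unfold Spec_parse parse parse_alt
  simp only []
  split
  · exact core _
  · rfl
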